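-- pv_equiv track=rewrite | github.com/Fiona0730pku/splendor_hackathon | envir2Vec.py | NoScore
-- ===== SOURCE A (Python) =====
-- def NoScore(envir):
--     out=[0]*3*16
--     for i in range(3):
--         cnt=0
--         out[i*16+cnt]=1
--         if "purchased_cards" in envir['players'][i].keys():
--             for card in envir['players'][i]["purchased_cards"]:
--                 if card['score']==0:
--                     cnt+=1
--                     out[i*16+cnt]=1
--     return out
-- ===== SOURCE B (Python) =====
-- def NoScore(envir):
--     out = []
--     for player in envir['players'][:3]:
--         cnt = sum(1 for card in player.get('purchased_cards', []) if card['score'] == 0)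
--         cnt = min(cnt, 15)
--         out += [1] * (cnt + 1) + [0] * (15 - cnt)
--     return out
-- ===== Notes on version B (the rewrite author's own statement) =====
-- stated objective: simpler
-- what changed: A fills a shared 48-cell buffer by in-place mutation fused with the per-card counting loop; B builds the vector by concatenating three independent 16-cell thermometer segments, each from the player's zero-score count capped at 15.
-- intended difference: When a player has more than 15 zero-score purchased cards (and more than the next player's own count allows it to hide), A's thermometer write spills 1s into the NEXT player's 16-cell segment; B caps each segment at 15 and keeps it within the player's own cells, which is the intended per-player encoding. — e.g. on NoScore([("players", [[("purchased_cards", [[("score", 0)], [("score", 0)], [("score", 0)], [("score", 0)], [("score", 0)], [("…): A returns [1,1,1,1,1,1,1,1,1,1,1,1,1,1,1,1, 1,1,0,0,0,0,0,0,0,0,0,0,0,0,0,0, 1,0,0,0,0,0,0,0,0,0,0,0,0,0,0,0], B returns [1,1,1,1,1,1,1,1,1,1,1,1,1,1,1,1, 1,0,0,0,0,0,0,0,0,0,0,0,0,0,0,0, 1,0,0,0,0,0,0,0,0,0,0,0,0,0,0,0]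
import Mathlib
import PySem

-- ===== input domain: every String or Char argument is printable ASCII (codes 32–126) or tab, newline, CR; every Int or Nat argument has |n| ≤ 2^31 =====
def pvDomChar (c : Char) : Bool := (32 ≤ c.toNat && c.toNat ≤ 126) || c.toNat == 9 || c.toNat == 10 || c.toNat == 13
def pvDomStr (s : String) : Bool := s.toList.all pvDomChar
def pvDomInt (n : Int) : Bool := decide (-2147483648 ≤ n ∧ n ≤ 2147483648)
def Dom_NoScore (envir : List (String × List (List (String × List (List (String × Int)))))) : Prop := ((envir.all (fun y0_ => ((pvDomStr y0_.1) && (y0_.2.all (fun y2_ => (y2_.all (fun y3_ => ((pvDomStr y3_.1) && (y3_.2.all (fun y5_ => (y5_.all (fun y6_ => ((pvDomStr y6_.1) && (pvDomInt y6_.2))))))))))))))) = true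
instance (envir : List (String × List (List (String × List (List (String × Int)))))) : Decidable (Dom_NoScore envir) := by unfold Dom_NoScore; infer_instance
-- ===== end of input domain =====

-- B replaces A's fused count-and-mutate pass over a shared 48-cell buffer by three independent
-- 16-cell thermometer segments, each from the player's zero-score count capped at 15 (simpler).

-- card['score'] == 0
def pvIsZeroScore (card : List (String × Int)) : Bool :=
  PySem.Dict.get? (PySem.Dict.mk card) "score" == some (0 : Int)

-- ===== PORT A =====
-- loop body of 'for card in …': out[i*16+cnt]=1 after cnt+=1, state (out, cnt)
def pvF (i : Nat) (st : List Int × Nat) (card : List (String × Int)) : List Int × Nat :=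
  if pvIsZeroScore card then (st.1.set (i * 16 + (st.2 + 1)) 1, st.2 + 1) else st

-- envir['players'][i] (players defaulting per the precondition's guarantee of presence)
def pvPlayerAt (envir : List (String × List (List (String × List (List (String × Int)))))) (i : Nat) : List (String × List (List (String × Int))) :=
  ((PySem.Dict.get? (PySem.Dict.mk envir) "players").getD []).getD i []

-- player["purchased_cards"] lookup (some = key present)
def pvCards? (player : List (String × List (List (String × Int)))) : Option (List (List (String × Int))) :=
  PySem.Dict.get? (PySem.Dict.mk player) "purchased_cards"

-- body of 'for i in range(3)': cnt=0; out[i*16+cnt]=1; the guarded inner loop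
def pvStep (envir : List (String × List (List (String × List (List (String × Int)))))) (out : List Int) (i : Nat) : List Int :=
  let out := out.set (i * 16 + 0) 1
  match pvCards? (pvPlayerAt envir i) with
  | some cards => (cards.foldl (pvF i) (out, 0)).1
  | none => out

def NoScore (envir : List (String × List (List (String × List (List (String × Int)))))) : List Int :=
  (List.range 3).foldl (pvStep envir) (List.replicate (3 * 16) 0)

-- ===== PORT B =====
-- cnt = number of purchased cards with score 0 (player.get('purchased_cards', []))
def pvZeroCnt (player : List (String × List (List (String × Int)))) : Nat :=
  (PySem.Dict.getD (PySem.Dict.mk player) "purchased_cards" []).countP pvIsZeroScore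

-- one player's 16-cell segment: [1]*(cnt+1) + [0]*(15-cnt) with cnt capped at 15
def pvSeg (player : List (String × List (List (String × Int)))) : List Int :=
  let cnt := min (pvZeroCnt player) 15
  List.replicate (cnt + 1) 1 ++ List.replicate (15 - cnt) 0

def NoScore_alt (envir : List (String × List (List (String × List (List (String × Int)))))) : List Int :=
  let players := PySem.List.slice ((PySem.Dict.get? (PySem.Dict.mk envir) "players").getD []) none (some 3)
  players.foldl (fun out p => out ++ pvSeg p) []

-- ===== PRECONDITION & SPEC =====
-- zero-score count of player i (input inspection through port A's accessors; used by Pre_/D_)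
def pvCntAt (envir : List (String × List (List (String × List (List (String × Int)))))) (i : Nat) : Nat :=
  List.countP pvIsZeroScore (Option.getD (pvCards? (pvPlayerAt envir i)) [])

-- Pre_ excludes exactly the inputs on which Python A raises: a missing 'players' key (KeyError),
-- fewer than 3 players (IndexError), a purchased card without a 'score' key (KeyError), and a
-- player i with more than 47-16*i zero-score cards (IndexError writing past index 47).
def Pre_NoScore (envir : List (String × List (List (String × List (List (String × Int)))))) : Prop :=
  (PySem.Dict.get? (PySem.Dict.mk envir) "players").isSome = true ∧
  3 ≤ ((PySem.Dict.get? (PySem.Dict.mk envir) "players").getD []).length ∧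
  ∀ i, i < 3 →
    (∀ card ∈ (pvCards? (pvPlayerAt envir i)).getD [],
        (PySem.Dict.get? (PySem.Dict.mk card) "score").isSome = true) ∧
    pvCntAt envir i + 16 * i ≤ 47
instance (envir : List (String × List (List (String × List (List (String × Int)))))) : Decidable (Pre_NoScore envir) := by unfold Pre_NoScore; infer_instance

def pvWitness_NoScore : (List (String × List (List (String × List (List (String × Int)))))) :=
  [("players", [[("purchased_cards", [[("score", 0)], [("score", 3)]])], [], []])]

-- When a player has more than 15 zero-score purchased cards (and more than the next player's own
-- count allows it to hide), A's thermometer write spills 1s into the NEXT player's 16-cell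
-- segment; B caps each segment at 15 and keeps it within the player's own cells, which is the
-- intended per-player encoding.
def D_NoScore (envir : List (String × List (List (String × List (List (String × Int)))))) : Prop :=
  ∃ j < 3, ∃ i < j, pvCntAt envir j < 15 ∧ (j - i) * 16 + pvCntAt envir j < pvCntAt envir i
instance (envir : List (String × List (List (String × List (List (String × Int)))))) : Decidable (D_NoScore envir) := by unfold D_NoScore; infer_instance

def Spec_NoScore (envir : List (String × List (List (String × List (List (String × Int)))))) (out : List Int) : Prop := ¬ D_NoScore envir → out = NoScore_alt envir
instance (envir : List (String × List (List (String × List (List (String × Int)))))) (out : List Int) : Decidable (Spec_NoScore envir out) := by unfold Spec_NoScore; infer_instance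

def pvDiffWitness_NoScore : (List (String × List (List (String × List (List (String × Int)))))) :=
  [("players", [[("purchased_cards",
      [[("score", 0)], [("score", 0)], [("score", 0)], [("score", 0)], [("score", 0)], [("score", 0)], [("score", 0)], [("score", 0)], [("score", 0)], [("score", 0)], [("score", 0)], [("score", 0)], [("score", 0)], [("score", 0)], [("score", 0)], [("score", 0)], [("score", 0)]])],
    [], []])]

def pvDiffWitnessOut_NoScore : (List Int) × (List Int) :=
  ([1,1,1,1,1,1,1,1,1,1,1,1,1,1,1,1,
    1,1,0,0,0,0,0,0,0,0,0,0,0,0,0,0,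
    1,0,0,0,0,0,0,0,0,0,0,0,0,0,0,0],
   [1,1,1,1,1,1,1,1,1,1,1,1,1,1,1,1,
    1,0,0,0,0,0,0,0,0,0,0,0,0,0,0,0,
    1,0,0,0,0,0,0,0,0,0,0,0,0,0,0,0])

-- ===== CLAIM (what is proved, stated in full; the proofs are below) =====
def Claim_unchanged_NoScore : Prop := ∀ (envir : List (String × List (List (String × List (List (String × Int)))))), Dom_NoScore envir → Pre_NoScore envir → Spec_NoScore envir (NoScore envir)
def Claim_changed_NoScore : Prop := Dom_NoScore (pvDiffWitness_NoScore) ∧ Pre_NoScore (pvDiffWitness_NoScore) ∧ D_NoScore (pvDiffWitness_NoScore) ∧ NoScore (pvDiffWitness_NoScore) = pvDiffWitnessOut_NoScore.1 ∧ NoScore_alt (pvDiffWitness_NoScore) = pvDiffWitnessOut_NoScore.2 ∧ pvDiffWitnessOut_NoScore.1 ≠ pvDiffWitnessOut_NoScore.2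
def Claim_exact_NoScore : Prop := ∀ (envir : List (String × List (List (String × List (List (String × Int)))))), Dom_NoScore envir → Pre_NoScore envir → D_NoScore envir → NoScore envir ≠ NoScore_alt envir

-- ===== LEMMAS AND PROOFS =====

theorem pv_inner_len (i : Nat) (cards : List (List (String × Int))) :
    ∀ (out : List Int) (c : Nat),
      ((cards.foldl (pvF i) (out, c)).1).length = out.length := by
  induction cards with
  | nil => intro out c; rfl
  | cons card rest ih =>
      intro out c
      simp only [List.foldl_cons, pvF]
      by_cases h : pvIsZeroScore card
      · simp only [h, if_pos]
        rw [ih]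
        exact List.length_set ..
      · simp only [h]
        exact ih out c

theorem pv_inner_spec (i : Nat) (cards : List (List (String × Int))) :
    ∀ (out : List Int) (c : Nat) (k : Nat),
      ((cards.foldl (pvF i) (out, c)).1)[k]? =
        if i * 16 + c < k ∧ k ≤ i * 16 + c + cards.countP pvIsZeroScore ∧ k < out.length
        then some 1 else out[k]? := by
  induction cards with
  | nil =>
      intro out c k
      simp only [List.foldl_nil, List.countP_nil, Nat.add_zero]
      rw [if_neg (by omega)]
  | cons card rest ih =>
      intro out c k
      simp only [List.foldl_cons, List.countP_cons, pvF]
      by_cases h : pvIsZeroScore card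
      · simp only [h, if_pos]
        rw [ih]
        rw [List.length_set, List.getElem?_set]
        split_ifs <;> first | rfl | (exfalso; omega) | (rw [List.getElem?_eq_none (by omega)])
      · simp only [h]
        rw [ih]
        simp only [Bool.false_eq_true, ite_false]
        split_ifs <;> first | rfl | (exfalso; omega)

theorem pvCntAt_eq (envir : List (String × List (List (String × List (List (String × Int)))))) (i : Nat) :
    pvCntAt envir i =
      pvZeroCnt (((PySem.Dict.get? (PySem.Dict.mk envir) "players").getD []).getD i []) := by
  unfold pvCntAt pvZeroCnt pvCards? pvPlayerAt
  rw [PySem.Dict.getD_eq_get?_getD]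

theorem pv_step_len (envir : List (String × List (List (String × List (List (String × Int)))))) (out : List Int) (i : Nat) :
    (pvStep envir out i).length = out.length := by
  unfold pvStep pvCards? pvPlayerAt
  simp only [List.getD_eq_getElem?_getD]
  cases hc : PySem.Dict.get? (PySem.Dict.mk ((((PySem.Dict.get? (PySem.Dict.mk envir) "players").getD [])[i]?).getD [])) "purchased_cards" with
  | none => simp [List.length_set]
  | some cards => simp [pv_inner_len, List.length_set]

theorem pv_step_spec (envir : List (String × List (List (String × List (List (String × Int)))))) (out : List Int) (i : Nat) (k : Nat) :
    (pvStep envir out i)[k]? =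
      if i * 16 ≤ k ∧ k ≤ i * 16 + pvCntAt envir i ∧ k < out.length
      then some 1 else out[k]? := by
  rw [pvCntAt_eq]
  unfold pvStep pvZeroCnt pvCards? pvPlayerAt
  simp only [List.getD_eq_getElem?_getD, Nat.add_zero]
  cases hc : PySem.Dict.get? (PySem.Dict.mk ((((PySem.Dict.get? (PySem.Dict.mk envir) "players").getD [])[i]?).getD [])) "purchased_cards" with
  | none =>
      rw [PySem.Dict.getD_eq_get?_getD, hc]
      simp only [Option.getD_none, List.countP_nil, Nat.add_zero]
      rw [List.getElem?_set]
      split_ifs <;> first | rfl | (exfalso; omega) | (rw [List.getElem?_eq_none (by omega)])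
  | some cards =>
      rw [PySem.Dict.getD_eq_get?_getD, hc]
      simp only [Option.getD_some]
      rw [pv_inner_spec]
      rw [List.length_set, List.getElem?_set]
      split_ifs <;> first | rfl | (exfalso; omega) | (rw [List.getElem?_eq_none (by omega)])

theorem pv_seg_len (p : List (String × List (List (String × Int)))) : (pvSeg p).length = 16 := by
  unfold pvSeg
  simp only [List.length_append, List.length_replicate]
  omega

theorem pv_seg_spec (p : List (String × List (List (String × Int)))) (m : Nat) :
    (pvSeg p)[m]? = if m < 16 then some (if m ≤ min (pvZeroCnt p) 15 then (1 : Int) else 0) else none := by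
  unfold pvSeg
  rw [List.getElem?_append]
  simp only [List.length_replicate, List.getElem?_replicate]
  split_ifs <;> first | rfl | omega

-- B on a ≥3-player list is the three explicit segments concatenated
theorem pv_alt_eq (envir : List (String × List (List (String × List (List (String × Int))))))
    (h3 : 3 ≤ ((PySem.Dict.get? (PySem.Dict.mk envir) "players").getD []).length) :
    NoScore_alt envir =
      pvSeg (((PySem.Dict.get? (PySem.Dict.mk envir) "players").getD []).getD 0 []) ++
      (pvSeg (((PySem.Dict.get? (PySem.Dict.mk envir) "players").getD []).getD 1 []) ++
       pvSeg (((PySem.Dict.get? (PySem.Dict.mk envir) "players").getD []).getD 2 [])) := by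
  unfold NoScore_alt
  rw [show ((3 : Int)) = ((3 : Nat) : Int) by norm_num, PySem.List.slice_to_natCast]
  cases hl : (PySem.Dict.get? (PySem.Dict.mk envir) "players").getD [] with
  | nil => rw [hl] at h3; simp at h3
  | cons p0 t0 =>
    cases t0 with
    | nil => rw [hl] at h3; simp at h3
    | cons p1 t1 =>
      cases t1 with
      | nil => rw [hl] at h3; simp at h3
      | cons p2 t2 =>
        simp [List.take, List.foldl, List.getD]

theorem pv_B_get (envir : List (String × List (List (String × List (List (String × Int))))))
    (h3 : 3 ≤ ((PySem.Dict.get? (PySem.Dict.mk envir) "players").getD []).length) (k : Nat) :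
    (NoScore_alt envir)[k]? =
      if k < 48 then
        some (if k - (k / 16) * 16 ≤ min (pvCntAt envir (k / 16)) 15 then (1 : Int) else 0)
      else none := by
  simp only [pvCntAt_eq]
  rw [pv_alt_eq envir h3]
  rw [List.getElem?_append, List.getElem?_append]
  simp only [pv_seg_len]
  by_cases h0 : k < 16
  · have hq : k / 16 = 0 := by omega
    rw [if_pos h0, pv_seg_spec, if_pos h0, if_pos (show k < 48 by omega), hq]
    norm_num
  · rw [if_neg h0]
    by_cases h1 : k - 16 < 16
    · have hq : k / 16 = 1 := by omega
      rw [if_pos h1, pv_seg_spec, if_pos h1, if_pos (show k < 48 by omega), hq]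
    · rw [if_neg h1, pv_seg_spec]
      by_cases h2 : k - 16 - 16 < 16
      · have hq : k / 16 = 2 := by omega
        rw [if_pos h2, if_pos (show k < 48 by omega), hq]
        have he : k - 2 * 16 = k - 16 - 16 := by omega
        rw [he]
      · rw [if_neg h2, if_neg (show ¬ k < 48 by omega)]

theorem pv_D_iff (envir : List (String × List (List (String × List (List (String × Int)))))) :
    D_NoScore envir ↔
      ((pvCntAt envir 1 < 15 ∧ 16 + pvCntAt envir 1 < pvCntAt envir 0) ∨
       (pvCntAt envir 2 < 15 ∧ 32 + pvCntAt envir 2 < pvCntAt envir 0) ∨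
       (pvCntAt envir 2 < 15 ∧ 16 + pvCntAt envir 2 < pvCntAt envir 1)) := by
  unfold D_NoScore
  constructor
  · rintro ⟨j, hj, i, hij, h⟩
    interval_cases j <;> interval_cases i <;> omega
  · rintro (⟨h1, h2⟩ | ⟨h1, h2⟩ | ⟨h1, h2⟩)
    · exact ⟨1, by omega, 0, by omega, by omega⟩
    · exact ⟨2, by omega, 0, by omega, by omega⟩
    · exact ⟨2, by omega, 1, by omega, by omega⟩

theorem NoScore_spec : Claim_unchanged_NoScore := by
  intro envir _ hpre
  unfold Spec_NoScore
  intro hnd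
  rw [pv_D_iff] at hnd
  obtain ⟨hs, h3, hrest⟩ := hpre
  have hb0 := (hrest 0 (by omega)).2
  have hb1 := (hrest 1 (by omega)).2
  have hb2 := (hrest 2 (by omega)).2
  apply List.ext_getElem?
  intro k
  have hA : NoScore envir = pvStep envir (pvStep envir (pvStep envir (List.replicate 48 0) 0) 1) 2 := by
    unfold NoScore
    rw [show List.range 3 = [0, 1, 2] from by decide]; rfl
  rw [hA]
  rw [pv_step_spec, pv_step_spec, pv_step_spec, pv_step_len, pv_step_len, List.length_replicate,
    List.getElem?_replicate, pv_B_get envir h3 k]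
  by_cases hk : k < 48
  · by_cases h0 : k < 16
    · rw [show k / 16 = 0 from by omega]
      split_ifs <;> first | rfl | (exfalso; omega)
    · by_cases h1 : k < 32
      · rw [show k / 16 = 1 from by omega]
        split_ifs <;> first | rfl | (exfalso; omega)
      · rw [show k / 16 = 2 from by omega]
        split_ifs <;> first | rfl | (exfalso; omega)
  · split_ifs <;> first | rfl | (exfalso; omega)

theorem NoScore_changed : Claim_changed_NoScore := by
  unfold Claim_changed_NoScore
  refine ⟨by decide, by decide, by decide, by decide, by decide, by decide⟩

theorem NoScore_tight : Claim_exact_NoScore := by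
  intro envir _ hpre hd heq
  obtain ⟨hs, h3, hrest⟩ := hpre
  have hb0 := (hrest 0 (by omega)).2
  have hb1 := (hrest 1 (by omega)).2
  have hb2 := (hrest 2 (by omega)).2
  have hA : NoScore envir = pvStep envir (pvStep envir (pvStep envir (List.replicate 48 0) 0) 1) 2 := by
    unfold NoScore
    rw [show List.range 3 = [0, 1, 2] from by decide]; rfl
  -- in each D_ case exhibit the differing cell k = j*16 + cnt_j + 1
  obtain ⟨j, k, hk48, hkj, hAcond, hBcond⟩ :
      ∃ j k, k < 48 ∧ k / 16 = j ∧
        (0 * 16 ≤ k ∧ k ≤ 0 * 16 + pvCntAt envir 0 ∨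
         1 * 16 ≤ k ∧ k ≤ 1 * 16 + pvCntAt envir 1 ∨
         2 * 16 ≤ k ∧ k ≤ 2 * 16 + pvCntAt envir 2) ∧
        ¬ (k - j * 16 ≤ min (pvCntAt envir j) 15) := by
    rcases (pv_D_iff envir).mp hd with h | h | h
    · exact ⟨1, 16 + pvCntAt envir 1 + 1, by omega, by omega, by omega, by omega⟩
    · exact ⟨2, 32 + pvCntAt envir 2 + 1, by omega, by omega, by omega, by omega⟩
    · exact ⟨2, 32 + pvCntAt envir 2 + 1, by omega, by omega, by omega, by omega⟩
  have hAk : (NoScore envir)[k]? = some 1 := by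
    rw [hA, pv_step_spec, pv_step_spec, pv_step_spec, pv_step_len, pv_step_len,
      List.length_replicate, List.getElem?_replicate]
    split_ifs <;> first | rfl | (exfalso; omega)
  have hBk : (NoScore_alt envir)[k]? = some 0 := by
    rw [pv_B_get envir h3 k, if_pos hk48, hkj, if_neg hBcond]
  rw [heq, hBk] at hAk
  exact absurd hAk (by simp)
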